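-- pv_equiv track=rewrite | github.com/Feng-Yin/adventofcode2024 | Day7/solution.py | get_new_ops
-- ===== SOURCE A (Python) =====
-- def get_new_ops(op, num_or):
--     ops = []
--     for i in range(len(op)):
--         if op[i] != "||":
--             opcopy = op.copy()
--             opcopy[i] = "||"
--             ops.append(opcopy)
--     num_or -= 1
--     if num_or == 0:
--         return ops
--     else:
--         re = []
--         for v in ops:
--             re.extend(get_new_ops(v, num_or))
--         return re
-- ===== SOURCE B (Python) =====
-- def get_new_ops(op, num_or):
--     # Enumerate ordered selections of num_or distinct free positions
--     # (k-permutations in Python's order) and apply each to a copy of op.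
--     free = [i for i, x in enumerate(op) if x != "||"]
--
--     def perms(xs, k):
--         if k == 0:
--             yield []
--             return
--         for j in range(len(xs)):
--             for rest in perms(xs[:j] + xs[j + 1:], k - 1):
--                 yield [xs[j]] + rest
--
--     result = []
--     for ps in perms(free, num_or):
--         new = op.copy()
--         for i in ps:
--             new[i] = "||"
--         result.append(new)
--     return result
-- ===== Notes on version B (the rewrite author's own statement) =====
-- stated objective: alternative
-- what changed: Replaces A's level-by-level recursive expansion (rebuild every one-substitution successor list at each level and recurse on each) by a direct enumeration of ordered k-selections of the free positions (k-permutations in Python's order), applying each selection to one copy of op.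
-- intended difference: When num_or = 0, A returns [] (its loop always expands at least once) while B returns [op], the intended result of making zero substitutions; for every other num_or (including negatives and num_or exceeding the number of free slots) the outputs are identical. — e.g. on get_new_ops(["1", "2"], 0): A returns [], B returns [["1", "2"]]
import Mathlib
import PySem

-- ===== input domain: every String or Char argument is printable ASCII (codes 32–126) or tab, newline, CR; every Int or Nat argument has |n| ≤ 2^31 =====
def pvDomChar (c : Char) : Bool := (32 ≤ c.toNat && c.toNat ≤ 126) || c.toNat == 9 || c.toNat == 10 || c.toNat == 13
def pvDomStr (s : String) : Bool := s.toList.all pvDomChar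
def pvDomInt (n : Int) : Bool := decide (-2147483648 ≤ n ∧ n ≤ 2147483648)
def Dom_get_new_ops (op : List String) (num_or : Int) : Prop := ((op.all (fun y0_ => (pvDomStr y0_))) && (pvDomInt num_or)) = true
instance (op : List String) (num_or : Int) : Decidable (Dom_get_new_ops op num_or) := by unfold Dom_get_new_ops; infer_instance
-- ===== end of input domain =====

-- B enumerates ordered selections of free positions directly (k-permutations) instead of
-- A's level-by-level recursive expansion; objective: alternative (same behaviour, no speed claim).

-- ===== PORT A =====
-- one expansion level: for i in range(len(op)): if op[i] != "||": append copy with op[i]="||"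
-- (op.getD i "" is exact here: i ranges over range(len(op)), always in bounds)
def pvLevelA (op : List String) : List (List String) :=
  (List.range op.length).foldl
    (fun acc i => if op.getD i "" ≠ "||" then acc ++ [op.set i "||"] else acc) []

-- A's recursion; fuel = number of non-"||" entries bounds the recursion depth exactly
-- (each recursive call is on a list with one more "||"), so this is A step for step.
def pvGoA : Nat → List String → Int → List (List String)
  | 0, _, _ => []
  | (f+1), op, num_or =>
      let ops := pvLevelA op
      if num_or - 1 = 0 then ops
      else ops.foldl (fun acc v => acc ++ pvGoA f v (num_or - 1)) []

def get_new_ops (op : List String) (num_or : Int) : List (List String) :=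
  pvGoA (op.countP (fun s => s ≠ "||")) op num_or

-- ===== PORT B =====
-- free = [i for i, x in enumerate(op) if x != "||"]  (hand port of the comprehension, exact)
def pvFreeB : List String → Nat → List Nat
  | [], _ => []
  | x :: xs, s => if x ≠ "||" then s :: pvFreeB xs (s+1) else pvFreeB xs (s+1)

-- perms(xs, k): yield [] if k == 0, else for j in range(len(xs)) prepend xs[j] to each
-- permutation of xs with index j removed (xs[:j] + xs[j+1:] = xs.eraseIdx j)
def pvPermsB (xs : List Nat) (k : Int) : List (List Nat) :=
  if k = 0 then [[]]
  else (List.range xs.length).attach.flatMap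
    (fun j => (pvPermsB (xs.eraseIdx j.1) (k - 1)).map (fun rest => xs.getD j.1 0 :: rest))
termination_by xs.length
decreasing_by
  have hj : j.1 < xs.length := List.mem_range.mp j.2
  simp [List.length_eraseIdx, hj]
  omega

def get_new_ops_alt (op : List String) (num_or : Int) : List (List String) :=
  (pvPermsB (pvFreeB op 0) num_or).map
    (fun ps => ps.foldl (fun acc i => acc.set i "||") op)

-- ===== PRECONDITION & SPEC =====
-- When num_or = 0, A returns [] (its loop always expands at least once) while B returns
-- [op] (zero substitutions leave op unchanged), which is the intended meaning of
-- "make num_or substitutions"; on every other input the two agree.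
def D_get_new_ops (op : List String) (num_or : Int) : Prop := num_or = 0
instance (op : List String) (num_or : Int) : Decidable (D_get_new_ops op num_or) := by
  unfold D_get_new_ops; infer_instance

def Spec_get_new_ops (op : List String) (num_or : Int) (out : List (List String)) : Prop :=
  ¬ D_get_new_ops op num_or → out = get_new_ops_alt op num_or
instance (op : List String) (num_or : Int) (out : List (List String)) :
    Decidable (Spec_get_new_ops op num_or out) := by unfold Spec_get_new_ops; infer_instance

def pvDiffWitness_get_new_ops : List String × Int := (["1", "2"], 0)
def pvDiffWitnessOut_get_new_ops : (List (List String)) × (List (List String)) :=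
  ([], [["1", "2"]])

-- ===== CLAIM (what is proved, stated in full; the proofs are below) =====
def Claim_unchanged_get_new_ops : Prop := ∀ (op : List String) (num_or : Int),
  Dom_get_new_ops op num_or → Spec_get_new_ops op num_or (get_new_ops op num_or)
def Claim_changed_get_new_ops : Prop :=
  Dom_get_new_ops (pvDiffWitness_get_new_ops.1) (pvDiffWitness_get_new_ops.2) ∧
  D_get_new_ops (pvDiffWitness_get_new_ops.1) (pvDiffWitness_get_new_ops.2) ∧
  get_new_ops (pvDiffWitness_get_new_ops.1) (pvDiffWitness_get_new_ops.2) = pvDiffWitnessOut_get_new_ops.1 ∧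
  get_new_ops_alt (pvDiffWitness_get_new_ops.1) (pvDiffWitness_get_new_ops.2) = pvDiffWitnessOut_get_new_ops.2 ∧
  pvDiffWitnessOut_get_new_ops.1 ≠ pvDiffWitnessOut_get_new_ops.2
def Claim_exact_get_new_ops : Prop := ∀ (op : List String) (num_or : Int),
  Dom_get_new_ops op num_or → D_get_new_ops op num_or →
  get_new_ops op num_or ≠ get_new_ops_alt op num_or

-- ===== LEMMAS AND PROOFS =====

-- generic loop shapes (proved here in the exact Prop-ite form the ports use)
theorem pv_foldl_append_if {a b : Type} (l : List a) (p : a → Prop) [DecidablePred p]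
    (g : a → b) (acc : List b) :
    l.foldl (fun ac x => if p x then ac ++ [g x] else ac) acc
      = acc ++ (l.filter (fun x => decide (p x))).map g := by
  induction l generalizing acc with
  | nil => simp
  | cons x xs ih =>
    by_cases hx : p x <;> simp [hx, ih]

theorem pv_foldl_extend {a b : Type} (l : List a) (g : a → List b) (acc : List b) :
    l.foldl (fun ac x => ac ++ g x) acc = acc ++ l.flatMap g := by
  induction l generalizing acc with
  | nil => simp
  | cons x xs ih => simp [ih]

theorem pv_flatMap_congr {a b : Type} {l : List a} {f g : a → List b}
    (h : ∀ x ∈ l, f x = g x) : l.flatMap f = l.flatMap g := by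
  simp only [List.flatMap_def]
  exact congrArg _ (List.map_congr_left h)

theorem pv_flatMap_single {a b : Type} (l : List a) (f : a → b) :
    l.flatMap (fun x => [f x]) = l.map f := by
  induction l with
  | nil => rfl
  | cons x xs ih => simp [ih]

-- the A-side level as filter-of-range, then as map over the free positions
theorem pv_levelA_filter (op : List String) :
    pvLevelA op = ((List.range op.length).filter
        (fun i => decide (op.getD i "" ≠ "||"))).map (fun i => op.set i "||") := by
  exact (pv_foldl_append_if (List.range op.length)
    (fun i => op.getD i "" ≠ "||") (fun i => op.set i "||") []).trans (List.nil_append _)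

theorem pv_freeB_eq (xs : List String) : ∀ s : Nat,
    pvFreeB xs s = ((List.range xs.length).filter
        (fun i => decide (xs.getD i "" ≠ "||"))).map (· + s) := by
  induction xs with
  | nil => intro s; simp [pvFreeB]
  | cons x xs ih =>
    intro s
    rw [List.length_cons, List.range_succ_eq_map, List.filter_cons, List.filter_map]
    have ht : List.filter ((fun i => decide ((x :: xs).getD i "" ≠ "||")) ∘ Nat.succ)
        (List.range xs.length)
      = List.filter (fun i => decide (xs.getD i "" ≠ "||")) (List.range xs.length) := by
      apply List.filter_congr
      intro i _
      simp
    rw [ht]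
    have hmap : ∀ l : List Nat, (l.map Nat.succ).map (· + s) = l.map (· + (s+1)) := by
      intro l
      rw [List.map_map]
      apply List.map_congr_left
      intro i _
      simp [Function.comp]
      omega
    by_cases hx : x ≠ "||"
    · rw [if_pos (by simpa using hx)]
      simp only [pvFreeB, if_pos hx, ih (s+1), List.map_cons, Nat.zero_add, hmap]
    · rw [if_neg (by simpa using hx)]
      simp only [pvFreeB, if_neg hx, ih (s+1), hmap]

theorem pv_levelA_eq (op : List String) :
    pvLevelA op = (pvFreeB op 0).map (fun i => op.set i "||") := by
  rw [pv_levelA_filter, pv_freeB_eq op 0]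
  simp

theorem pv_freeB_mem {op : List String} {i : Nat} (h : i ∈ pvFreeB op 0) :
    i < op.length ∧ op.getD i "" ≠ "||" := by
  rw [pv_freeB_eq op 0] at h
  simp only [List.mem_map, List.mem_filter, List.mem_range] at h
  obtain ⟨j, ⟨hj, hg⟩, rfl⟩ := h
  simpa using ⟨hj, of_decide_eq_true hg⟩

theorem pv_freeB_length (xs : List String) : ∀ s : Nat,
    (pvFreeB xs s).length = xs.countP (fun y => y ≠ "||") := by
  induction xs with
  | nil => intro s; simp [pvFreeB]
  | cons x xs ih =>
    intro s
    by_cases hx : x ≠ "||" <;> simp [pvFreeB, hx, ih (s+1)]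

theorem pv_freeB_ge (xs : List String) : ∀ (s : Nat) (e : Nat), e ∈ pvFreeB xs s → s ≤ e := by
  induction xs with
  | nil => intro s e h; simp [pvFreeB] at h
  | cons x xs ih =>
    intro s e h
    by_cases hx : x ≠ "||" <;> simp [pvFreeB, hx] at h
    · rcases h with rfl | h
      · exact Nat.le_refl _
      · exact Nat.le_of_succ_le (ih (s+1) e h)
    · exact Nat.le_of_succ_le (ih (s+1) e h)

-- setting the j-th free position to "||" removes exactly that entry of the free list
theorem pv_freeB_set (xs : List String) : ∀ (s j : Nat), j < (pvFreeB xs s).length →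
    pvFreeB (xs.set ((pvFreeB xs s).getD j 0 - s) "||") s = (pvFreeB xs s).eraseIdx j := by
  induction xs with
  | nil => intro s j hj; simp [pvFreeB] at hj
  | cons x xs ih =>
    intro s j hj
    by_cases hx : x ≠ "||"
    · simp only [pvFreeB, if_pos hx] at hj ⊢
      cases j with
      | zero =>
        simp [pvFreeB]
      | succ j =>
        simp only [List.length_cons, Nat.succ_lt_succ_iff] at hj
        have he : (pvFreeB xs (s+1)).getD j 0 ∈ pvFreeB xs (s+1) := by
          rw [List.getD_eq_getElem _ _ hj]
          exact List.getElem_mem hj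
        have hge : s + 1 ≤ (pvFreeB xs (s+1)).getD j 0 := pv_freeB_ge xs (s+1) _ he
        have harith2 : (s :: pvFreeB xs (s+1)).getD (j+1) 0 - s
            = ((pvFreeB xs (s+1)).getD j 0 - (s+1)) + 1 := by
          simp only [List.getD_cons_succ]; omega
        rw [harith2, List.set_cons_succ, List.eraseIdx_cons_succ]
        simp only [pvFreeB, if_pos hx]
        rw [ih (s+1) j hj]
    · simp only [pvFreeB, if_neg hx] at hj ⊢
      have he : (pvFreeB xs (s+1)).getD j 0 ∈ pvFreeB xs (s+1) := by
        rw [List.getD_eq_getElem _ _ hj]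
        exact List.getElem_mem hj
      have hge : s + 1 ≤ (pvFreeB xs (s+1)).getD j 0 := pv_freeB_ge xs (s+1) _ he
      have harith : (pvFreeB xs (s+1)).getD j 0 - s
          = ((pvFreeB xs (s+1)).getD j 0 - (s+1)) + 1 := by omega
      rw [harith, List.set_cons_succ]
      simp only [pvFreeB, if_neg hx]
      exact ih (s+1) j hj

theorem pv_countP_set (op : List String) : ∀ i : Nat, i < op.length → op.getD i "" ≠ "||" →
    (op.set i "||").countP (fun y => y ≠ "||") + 1 = op.countP (fun y => y ≠ "||") := by
  induction op with
  | nil => intro i h; simp at h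
  | cons x xs ih =>
    intro i hi hne
    cases i with
    | zero => simp_all
    | succ i =>
      simp only [List.getD_cons_succ] at hne
      simp only [List.length_cons, Nat.succ_lt_succ_iff] at hi
      simp only [List.set_cons_succ, List.countP_cons]
      rw [← ih i hi hne]
      omega

-- A returns [] whenever num_or ≤ 0 (the test num_or - 1 == 0 can never fire)
theorem pv_goA_nonpos : ∀ (f : Nat) (op : List String) (n : Int), n ≤ 0 → pvGoA f op n = [] := by
  intro f
  induction f with
  | zero => intro op n h; rfl
  | succ f ih =>
    intro op n h
    have h1 : ¬ (n - 1 = 0) := by omega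
    simp only [pvGoA, if_neg h1]
    rw [pv_foldl_extend]
    have : ∀ v ∈ pvLevelA op, pvGoA f v (n - 1) = [] := by
      intro v _; exact ih v (n-1) (by omega)
    rw [pv_flatMap_congr this]
    simp

theorem pv_permsB_zero (xs : List Nat) : pvPermsB xs 0 = [[]] := by
  rw [pvPermsB]; simp

theorem pv_permsB_ne (xs : List Nat) {n : Int} (h : n ≠ 0) :
    pvPermsB xs n = (List.range xs.length).attach.flatMap
      (fun j => (pvPermsB (xs.eraseIdx j.1) (n - 1)).map
        (fun rest => xs.getD j.1 0 :: rest)) := by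
  rw [pvPermsB]; simp [h]

theorem pv_attach_flatMap {b : Type} (n : Nat) (G : Nat → List b) :
    (List.range n).attach.flatMap (fun j => G j.1) = (List.range n).flatMap G := by
  conv_rhs => rw [← List.attach_map_subtype_val (List.range n)]
  rw [List.flatMap_map]

theorem pv_flatMap_range_getD {b : Type} (l : List Nat) (F : Nat → List b) :
    (List.range l.length).flatMap (fun j => F (l.getD j 0)) = l.flatMap F := by
  induction l with
  | nil => simp
  | cons x xs ih =>
    rw [List.length_cons, List.range_succ_eq_map, List.flatMap_cons, List.flatMap_map]
    have ht : List.flatMap (fun a => F ((x :: xs).getD (Nat.succ a) 0)) (List.range xs.length)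
        = List.flatMap (fun j => F (xs.getD j 0)) (List.range xs.length) := by
      apply pv_flatMap_congr
      intro i _
      simp
    rw [ht, ih]
    simp

-- the main equivalence, by induction on the number of free positions
theorem pv_main : ∀ (f : Nat) (op : List String) (n : Int),
    op.countP (fun y => y ≠ "||") = f → n ≠ 0 →
    pvGoA f op n = (pvPermsB (pvFreeB op 0) n).map
      (fun ps => ps.foldl (fun acc i => acc.set i "||") op) := by
  intro f
  induction f with
  | zero =>
    intro op n hc hn
    have hfree : pvFreeB op 0 = [] := by
      have := pv_freeB_length op 0
      rw [hc] at this
      exact List.eq_nil_of_length_eq_zero this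
    rw [hfree, pv_permsB_ne _ hn]
    simp [pvGoA]
  | succ f ih =>
    intro op n hc hn
    -- rewrite the RHS into a flatMap over the free positions
    have hmem : ∀ i ∈ pvFreeB op 0, i < op.length ∧ op.getD i "" ≠ "||" :=
      fun i h => pv_freeB_mem h
    have key : (pvPermsB (pvFreeB op 0) n).map
          (fun ps => ps.foldl (fun acc i => acc.set i "||") op)
        = (pvFreeB op 0).flatMap (fun i =>
            (pvPermsB (pvFreeB (op.set i "||") 0) (n - 1)).map
              (fun ps => ps.foldl (fun acc k => acc.set k "||") (op.set i "||"))) := by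
      rw [pv_permsB_ne _ hn, List.map_flatMap]
      rw [pv_attach_flatMap ((pvFreeB op 0).length)
        (fun j => ((pvPermsB ((pvFreeB op 0).eraseIdx j) (n - 1)).map
          (fun rest => (pvFreeB op 0).getD j 0 :: rest)).map
            (fun ps => ps.foldl (fun acc i => acc.set i "||") op))]
      rw [← pv_flatMap_range_getD (pvFreeB op 0)
        (fun i => (pvPermsB (pvFreeB (op.set i "||") 0) (n - 1)).map
          (fun ps => ps.foldl (fun acc k => acc.set k "||") (op.set i "||")))]
      apply pv_flatMap_congr
      intro j hj
      rw [List.mem_range] at hj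
      have herase := pv_freeB_set op 0 j hj
      simp only [Nat.sub_zero] at herase
      rw [herase, List.map_map]
      rfl
    by_cases h1 : n = 1
    · subst h1
      simp only [pvGoA, sub_self]
      rw [key, pv_levelA_eq]
      have : ∀ i ∈ pvFreeB op 0,
          (pvPermsB (pvFreeB (op.set i "||") 0) (1 - 1)).map
              (fun ps => ps.foldl (fun acc k => acc.set k "||") (op.set i "||"))
            = [op.set i "||"] := by
        intro i _
        norm_num [pv_permsB_zero]
      rw [pv_flatMap_congr this]
      exact (pv_flatMap_single _ _).symm
    · have h1' : ¬ (n - 1 = 0) := by omega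
      simp only [pvGoA, if_neg h1']
      rw [pv_foldl_extend, List.nil_append, pv_levelA_eq, List.flatMap_map, key]
      apply pv_flatMap_congr
      intro i hi
      obtain ⟨hlt, hne⟩ := hmem i hi
      have hcp : (op.set i "||").countP (fun y => y ≠ "||") = f := by
        have := pv_countP_set op i hlt hne
        omega
      exact ih (op.set i "||") (n - 1) hcp (by omega)

theorem pv_alt_zero (op : List String) : get_new_ops_alt op 0 = [op] := by
  simp [get_new_ops_alt, pv_permsB_zero]

-- ===== VERDICT (by name: the statement is the Claim_ definition above) =====
theorem get_new_ops_spec : Claim_unchanged_get_new_ops := by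
  intro op n _ hnd
  have hn : n ≠ 0 := by
    intro h; exact hnd h
  exact pv_main (op.countP (fun y => y ≠ "||")) op n rfl hn
theorem get_new_ops_changed : Claim_changed_get_new_ops := by
  unfold Claim_changed_get_new_ops
  refine ⟨by decide, by decide, by decide, ?_, by decide⟩
  exact pv_alt_zero _
theorem get_new_ops_tight : Claim_exact_get_new_ops := by
  intro op n _ hd
  have hn : n = 0 := hd
  subst hn
  rw [pv_alt_zero, get_new_ops, pv_goA_nonpos _ _ _ (by omega)]
  simp
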